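-- pv_equiv track=rewrite | github.com/Crazzy-Rabbit/ldscpp | test/compare_full_parity.py | normalize_log
-- ===== SOURCE A (Python) =====
-- def normalize_log(text: str) -> str:
--     lines = []
--     skip_call = False
--     skip_ldscore_diagnostics = False
--     for line in text.splitlines():
--         stripped = line.rstrip()
--         if skip_call:
--             if stripped == "":
--                 skip_call = False
--             continue
--         if skip_ldscore_diagnostics:
--             if stripped.startswith("Analysis finished at "):
--                 skip_ldscore_diagnostics = False
--                 lines.append("Analysis finished at <TIME>")
--             continue
--         if stripped == "Call:":
--             lines.append("Call: <PARAMETERS_CHECKED_SEPARATELY>")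
--             skip_call = True
--         elif stripped.startswith("Summary of LD Scores in "):
--             lines.append("Summary of LD Scores in <LDSCORE_OUTPUT>")
--             lines.append("<LDSCORE_DIAGNOSTICS>")
--             skip_ldscore_diagnostics = True
--         elif line.startswith("* (C) "):
--             lines.append("* (C) <AUTHOR>")
--         elif line.startswith("* Broad Institute") or line.startswith("* West China Hospital"):
--             lines.append("* <INSTITUTION>")
--         elif line.startswith("Beginning analysis at "):
--             lines.append("Beginning analysis at <TIME>")
--         elif line.startswith("Analysis finished at "):
--             lines.append("Analysis finished at <TIME>")
--         elif line.startswith("Conversion finished at "):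
--             lines.append("Conversion finished at <TIME>")
--         elif line.startswith("Total time elapsed: "):
--             lines.append("Total time elapsed: <ELAPSED>")
--         else:
--             lines.append(stripped)
--     return "\n".join(lines) + "\n"
-- ===== SOURCE B (Python) =====
-- PREFIX_MAP = [
--     ("* (C) ", "* (C) <AUTHOR>"),
--     ("* Broad Institute", "* <INSTITUTION>"),
--     ("* West China Hospital", "* <INSTITUTION>"),
--     ("Beginning analysis at ", "Beginning analysis at <TIME>"),
--     ("Analysis finished at ", "Analysis finished at <TIME>"),
--     ("Conversion finished at ", "Conversion finished at <TIME>"),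
--     ("Total time elapsed: ", "Total time elapsed: <ELAPSED>"),
-- ]
--
--
-- def normalize_log(text: str) -> str:
--     lines = text.splitlines()
--     out = []
--     i = 0
--     n = len(lines)
--     while i < n:
--         line = lines[i]
--         stripped = line.rstrip()
--         i += 1
--         if stripped == "Call:":
--             out.append("Call: <PARAMETERS_CHECKED_SEPARATELY>")
--             # drop lines until (and including) the next blank-after-rstrip line
--             while i < n:
--                 blank = lines[i].rstrip() == ""
--                 i += 1
--                 if blank:
--                     break
--         elif stripped.startswith("Summary of LD Scores in "):
--             out.append("Summary of LD Scores in <LDSCORE_OUTPUT>")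
--             out.append("<LDSCORE_DIAGNOSTICS>")
--             # drop diagnostics until the 'Analysis finished at ' line, replaced
--             while i < n:
--                 nxt = lines[i]
--                 i += 1
--                 if nxt.rstrip().startswith("Analysis finished at "):
--                     out.append("Analysis finished at <TIME>")
--                     break
--         else:
--             for pre, repl in PREFIX_MAP:
--                 if line.startswith(pre):
--                     out.append(repl)
--                     break
--             else:
--                 out.append(stripped)
--     return "\n".join(out) + "\n"
-- ===== Notes on version B (the rewrite author's own statement) =====
-- stated objective: alternative
-- what changed: Replaces A's boolean skip-flag state machine (one for-loop threading skip_call/skip_ldscore_diagnostics) with an explicit index loop that handles each skip region by a dedicated inner loop, and collapses the seven single-line prefix branches into a prefix->placeholder table scanned with for/else.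
import Mathlib
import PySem

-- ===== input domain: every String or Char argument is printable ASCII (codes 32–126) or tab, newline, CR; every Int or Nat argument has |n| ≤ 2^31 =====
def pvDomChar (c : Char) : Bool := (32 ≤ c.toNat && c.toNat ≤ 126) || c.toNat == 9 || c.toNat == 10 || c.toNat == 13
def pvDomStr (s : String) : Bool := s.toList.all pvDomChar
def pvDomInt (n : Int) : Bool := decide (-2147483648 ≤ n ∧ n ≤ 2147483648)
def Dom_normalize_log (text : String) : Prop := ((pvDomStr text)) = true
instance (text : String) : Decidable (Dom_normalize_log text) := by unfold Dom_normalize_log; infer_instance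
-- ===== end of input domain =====

-- B replaces A's boolean skip-flag state machine by direct nested skipping loops and a
-- prefix→placeholder table; objective: alternative decomposition (same single pass, no speed claim).

-- ===== PORT A =====
-- one step of A's for-loop; state = (lines, skip_call, skip_ldscore_diagnostics)
def stepA (st : List String × Bool × Bool) (line : String) : List String × Bool × Bool :=
  let (lines, skip_call, skip_ld) := st
  let stripped := PySem.Str.rstrip line
  if skip_call then
    if stripped == "" then (lines, false, skip_ld) else st
  else if skip_ld then
    if PySem.Str.startswith stripped "Analysis finished at " then
      (lines ++ ["Analysis finished at <TIME>"], skip_call, false)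
    else st
  else if stripped == "Call:" then
    (lines ++ ["Call: <PARAMETERS_CHECKED_SEPARATELY>"], true, skip_ld)
  else if PySem.Str.startswith stripped "Summary of LD Scores in " then
    (lines ++ ["Summary of LD Scores in <LDSCORE_OUTPUT>", "<LDSCORE_DIAGNOSTICS>"], skip_call, true)
  else if PySem.Str.startswith line "* (C) " then
    (lines ++ ["* (C) <AUTHOR>"], skip_call, skip_ld)
  else if PySem.Str.startswith line "* Broad Institute" || PySem.Str.startswith line "* West China Hospital" then
    (lines ++ ["* <INSTITUTION>"], skip_call, skip_ld)
  else if PySem.Str.startswith line "Beginning analysis at " then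
    (lines ++ ["Beginning analysis at <TIME>"], skip_call, skip_ld)
  else if PySem.Str.startswith line "Analysis finished at " then
    (lines ++ ["Analysis finished at <TIME>"], skip_call, skip_ld)
  else if PySem.Str.startswith line "Conversion finished at " then
    (lines ++ ["Conversion finished at <TIME>"], skip_call, skip_ld)
  else if PySem.Str.startswith line "Total time elapsed: " then
    (lines ++ ["Total time elapsed: <ELAPSED>"], skip_call, skip_ld)
  else
    (lines ++ [stripped], skip_call, skip_ld)

def normalize_log (text : String) : String :=
  let res := (PySem.Str.splitlines text).foldl stepA ([], false, false)
  PySem.Str.join "\n" res.1 ++ "\n"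

-- ===== PORT B =====
def pvPrefixMap : List (String × String) :=
  [("* (C) ", "* (C) <AUTHOR>"),
   ("* Broad Institute", "* <INSTITUTION>"),
   ("* West China Hospital", "* <INSTITUTION>"),
   ("Beginning analysis at ", "Beginning analysis at <TIME>"),
   ("Analysis finished at ", "Analysis finished at <TIME>"),
   ("Conversion finished at ", "Conversion finished at <TIME>"),
   ("Total time elapsed: ", "Total time elapsed: <ELAPSED>")]

-- Source B's inner 'drop until a blank (after rstrip) line' loop, consuming the blank line too
def skipBlank : List String → List String
  | [] => []
  | l :: rest => if PySem.Str.rstrip l == "" then rest else skipBlank rest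

-- cited by bGo's decreasing_by
theorem skipBlank_length_le (ls : List String) : (skipBlank ls).length ≤ ls.length := by
  induction ls with
  | nil => simp [skipBlank]
  | cons l rest ih =>
    simp only [skipBlank]
    split
    · simp
    · exact Nat.le_succ_of_le ih

mutual
-- Source B's outer while loop over the line list (the for/break/else over PREFIX_MAP is List.find?)
def bGo : List String → List String
  | [] => []
  | line :: rest =>
    let stripped := PySem.Str.rstrip line
    if stripped == "Call:" then
      "Call: <PARAMETERS_CHECKED_SEPARATELY>" :: bGo (skipBlank rest)
    else if PySem.Str.startswith stripped "Summary of LD Scores in " then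
      "Summary of LD Scores in <LDSCORE_OUTPUT>" :: "<LDSCORE_DIAGNOSTICS>" :: bLd rest
    else
      match pvPrefixMap.find? (fun p => PySem.Str.startswith line p.1) with
      | some p => p.2 :: bGo rest
      | none => stripped :: bGo rest
termination_by ls => ls.length
decreasing_by
  · exact Nat.lt_succ_of_le (skipBlank_length_le rest)
  · simp
  · simp

-- Source B's inner diagnostics-dropping loop after a 'Summary of LD Scores in ' line
def bLd : List String → List String
  | [] => []
  | l :: rest =>
    if PySem.Str.startswith (PySem.Str.rstrip l) "Analysis finished at " then
      "Analysis finished at <TIME>" :: bGo rest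
    else bLd rest
termination_by ls => ls.length
decreasing_by
  · simp
  · simp
end

def normalize_log_alt (text : String) : String :=
  PySem.Str.join "\n" (bGo (PySem.Str.splitlines text)) ++ "\n"

-- ===== PRECONDITION & SPEC =====
def Spec_normalize_log (text : String) (out : String) : Prop := out = normalize_log_alt text
instance (text : String) (out : String) : Decidable (Spec_normalize_log text out) := by unfold Spec_normalize_log; infer_instance

-- ===== CLAIM (what is proved, stated in full; the proofs are below) =====
def Claim_equal_normalize_log : Prop := ∀ (text : String), Dom_normalize_log text → Spec_normalize_log text (normalize_log text)

-- ===== LEMMAS AND PROOFS =====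

-- unfolding equations for the mutual well-founded recursion
theorem bGo_nil : bGo [] = [] := by rw [bGo.eq_def]
theorem bLd_nil : bLd [] = [] := by rw [bLd.eq_def]
theorem bGo_cons (line : String) (rest : List String) :
    bGo (line :: rest) =
      (if PySem.Str.rstrip line == "Call:" then
        "Call: <PARAMETERS_CHECKED_SEPARATELY>" :: bGo (skipBlank rest)
      else if PySem.Str.startswith (PySem.Str.rstrip line) "Summary of LD Scores in " then
        "Summary of LD Scores in <LDSCORE_OUTPUT>" :: "<LDSCORE_DIAGNOSTICS>" :: bLd rest
      else
        match pvPrefixMap.find? (fun p => PySem.Str.startswith line p.1) with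
        | some p => p.2 :: bGo rest
        | none => PySem.Str.rstrip line :: bGo rest) := by
  rw [bGo.eq_def]
theorem bLd_cons (l : String) (rest : List String) :
    bLd (l :: rest) =
      (if PySem.Str.startswith (PySem.Str.rstrip l) "Analysis finished at " then
        "Analysis finished at <TIME>" :: bGo rest
      else bLd rest) := by
  rw [bLd.eq_def]

-- A's fold from any reachable state equals B's nested-loop recursion
theorem loop_eq (ls : List String) : ∀ (acc : List String) (c d : Bool),
    (ls.foldl stepA (acc, c, d)).1 =
      acc ++ (if c then (if d then bLd (skipBlank ls) else bGo (skipBlank ls))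
              else if d then bLd ls else bGo ls) := by
  induction ls with
  | nil => intro acc c d; cases c <;> cases d <;> simp [skipBlank, bGo_nil, bLd_nil]
  | cons line rest ih =>
    intro acc c d
    simp only [List.foldl_cons]
    cases c with
    | true =>
      by_cases hb : PySem.Str.rstrip line == ""
      · simp at hb; simp [stepA, hb, skipBlank, ih]
      · simp at hb; simp [stepA, hb, skipBlank, ih]
    | false =>
      cases d with
      | true =>
        by_cases ha : PySem.Str.startswith (PySem.Str.rstrip line) "Analysis finished at " = true
        · simp at ha; simp [stepA, ha, bLd_cons, ih]
        · simp at ha; simp [stepA, ha, bLd_cons, ih]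
      | false =>
        by_cases hc : PySem.Str.rstrip line == "Call:"
        · simp at hc; simp [stepA, hc, bGo_cons, ih]
        · by_cases hs : PySem.Str.startswith (PySem.Str.rstrip line) "Summary of LD Scores in " = true
          · simp at hc hs; simp [stepA, hc, hs, bGo_cons, ih]
          · simp at hc hs
            by_cases h1 : PySem.Str.startswith line "* (C) " = true
            · simp at h1; simp [stepA, hc, hs, h1, bGo_cons, pvPrefixMap, ih]
            by_cases h2 : PySem.Str.startswith line "* Broad Institute" = true
            · simp at h1 h2; simp [stepA, hc, hs, h1, h2, bGo_cons, pvPrefixMap, ih]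
            by_cases h3 : PySem.Str.startswith line "* West China Hospital" = true
            · simp at h1 h2 h3; simp [stepA, hc, hs, h1, h2, h3, bGo_cons, pvPrefixMap, ih]
            by_cases h4 : PySem.Str.startswith line "Beginning analysis at " = true
            · simp at h1 h2 h3 h4; simp [stepA, hc, hs, h1, h2, h3, h4, bGo_cons, pvPrefixMap, ih]
            by_cases h5 : PySem.Str.startswith line "Analysis finished at " = true
            · simp at h1 h2 h3 h4 h5; simp [stepA, hc, hs, h1, h2, h3, h4, h5, bGo_cons, pvPrefixMap, ih]
            by_cases h6 : PySem.Str.startswith line "Conversion finished at " = true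
            · simp at h1 h2 h3 h4 h5 h6; simp [stepA, hc, hs, h1, h2, h3, h4, h5, h6, bGo_cons, pvPrefixMap, ih]
            by_cases h7 : PySem.Str.startswith line "Total time elapsed: " = true
            · simp at h1 h2 h3 h4 h5 h6 h7; simp [stepA, hc, hs, h1, h2, h3, h4, h5, h6, h7, bGo_cons, pvPrefixMap, ih]
            · simp at h1 h2 h3 h4 h5 h6 h7; simp [stepA, hc, hs, h1, h2, h3, h4, h5, h6, h7, bGo_cons, pvPrefixMap, ih]

-- ===== VERDICT (by name: the statement is the Claim_ definition above) =====
theorem normalize_log_spec : Claim_equal_normalize_log := by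
  intro text _
  unfold Spec_normalize_log normalize_log normalize_log_alt
  simp [loop_eq]
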